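-- pv_equiv track=rewrite | github.com/mikkelfo/CORE-BEHRT | ehr2vec/main_pretrain_behrt.py | convert_segment_to_position
-- ===== SOURCE A (Python) =====
-- def convert_segment_to_position(segments: list):
--     """From segment AABBCC to position 001122"""
--     converted_segments = []
--     flag = 0
--     for i, segment in enumerate(segments):
--         converted_segments.append(flag)
--         if i < len(segments) - 1:
--             if segment != segments[i+1]:
--                 flag += 1
--     return converted_segments
-- ===== SOURCE B (Python) =====
-- def convert_segment_to_position(segments: list):
--     """From segment AABBCC to position 001122.
--
--     Run-based: split the list into maximal runs of equal consecutive values,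
--     then emit each run's index once per element of the run.
--     """
--     out = []
--     pos = 0
--     rest = segments
--     while rest:
--         x = rest[0]
--         run = 1
--         while run < len(rest) and rest[run] == x:
--             run += 1
--         out.extend([pos] * run)
--         rest = rest[run:]
--         pos += 1
--     return out
-- ===== Notes on version B (the rewrite author's own statement) =====
-- stated objective: idiomatic
-- what changed: B splits the input into maximal runs of equal consecutive values (groupby-style) and emits each run's index once per element, instead of A's per-element forward pass with a lookahead comparison and a manual flag counter.
import Mathlib
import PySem

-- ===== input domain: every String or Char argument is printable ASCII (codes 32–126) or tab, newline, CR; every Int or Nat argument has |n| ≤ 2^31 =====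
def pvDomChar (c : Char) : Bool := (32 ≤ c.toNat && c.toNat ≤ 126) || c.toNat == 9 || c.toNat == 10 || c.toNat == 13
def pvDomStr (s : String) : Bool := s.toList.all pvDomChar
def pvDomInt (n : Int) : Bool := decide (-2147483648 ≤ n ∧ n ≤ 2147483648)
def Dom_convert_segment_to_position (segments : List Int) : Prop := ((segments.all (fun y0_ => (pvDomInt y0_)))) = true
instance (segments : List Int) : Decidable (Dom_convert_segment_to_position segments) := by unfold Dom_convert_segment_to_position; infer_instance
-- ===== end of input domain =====

-- B numbers maximal runs of equal consecutive values and emits each run's index per element,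
-- instead of A's per-element pass with a lookahead comparison and a manual flag counter (idiomatic decomposition).


-- ===== PORT A =====
-- literal transliteration of A: for i, segment in enumerate(segments): append flag;
-- if i < len-1 and segment != segments[i+1]: flag += 1.
-- (segments[i+1] is only consulted under the guard i < len-1, where it is in range,
-- so pyGetD with a dummy default is exact.)
def convert_segment_to_position (segments : List Int) : List Int :=
  ((PySem.List.enumerate segments).foldl
    (fun (st : List Int × Int) (p : Int × Int) =>
      (st.1 ++ [st.2],
       if p.1 < (segments.length : Int) - 1 then
         if p.2 ≠ PySem.List.pyGetD segments (p.1 + 1) 0 then st.2 + 1 else st.2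
       else st.2))
    ([], 0)).1

-- ===== PORT B =====
-- B's inner while loop: the maximal run of values equal to x at the front has length 1 + this.
def pvRunLen (x : Int) (rest : List Int) : Nat := (rest.takeWhile (fun y => y == x)).length

-- B's outer while loop: peel off one run per iteration, emit pos once per run element.
def pvGoB : List Int → Int → List Int
  | [], _ => []
  | x :: xs, pos =>
      List.replicate (1 + pvRunLen x xs) pos ++ pvGoB (xs.dropWhile (fun y => y == x)) (pos + 1)
  termination_by rest _ => rest.length
  decreasing_by
    simp only [List.length_cons]
    exact Nat.lt_succ_of_le (List.length_dropWhile_le _ _)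

def convert_segment_to_position_alt (segments : List Int) : List Int :=
  pvGoB segments 0

-- ===== PRECONDITION & SPEC =====
def Spec_convert_segment_to_position (segments : List Int) (out : List Int) : Prop := out = convert_segment_to_position_alt segments
instance (segments : List Int) (out : List Int) : Decidable (Spec_convert_segment_to_position segments out) := by unfold Spec_convert_segment_to_position; infer_instance

-- ===== CLAIM (what is proved, stated in full; the proofs are below) =====
def Claim_equal_convert_segment_to_position : Prop := ∀ (segments : List Int), Dom_convert_segment_to_position segments → Spec_convert_segment_to_position segments (convert_segment_to_position segments)

-- ===== LEMMAS AND PROOFS =====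

-- recursive characterisation of A's loop, carrying the running flag
def pvARec : List Int → Int → List Int
  | [], _ => []
  | [_], flag => [flag]
  | x :: y :: xs, flag => flag :: pvARec (y :: xs) (if x ≠ y then flag + 1 else flag)

-- the step function of A's fold, named so the lemma can talk about it
def pvStepA (segments : List Int) (st : List Int × Int) (p : Int × Int) : List Int × Int :=
  (st.1 ++ [st.2],
   if p.1 < (segments.length : Int) - 1 then
     if p.2 ≠ PySem.List.pyGetD segments (p.1 + 1) 0 then st.2 + 1 else st.2
   else st.2)

-- A's fold on the suffix starting at index k computes acc ++ pvARec of that suffix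
theorem pvFoldA (segments : List Int) :
    ∀ (xs : List Int) (k : Nat) (acc : List Int) (flag : Int),
      segments.drop k = xs →
      ((PySem.List.enumerate xs (k : Int)).foldl (pvStepA segments) (acc, flag)).1
        = acc ++ pvARec xs flag := by
  intro xs
  induction xs with
  | nil => intro k acc flag _; simp [pvARec, PySem.List.enumerate_nil]
  | cons x rest ih =>
    intro k acc flag hdrop
    have hk : k < segments.length := by
      by_contra h
      rw [List.drop_eq_nil_of_le (by omega)] at hdrop
      simp at hdrop
    have hdrop1 : segments.drop (k + 1) = rest := by
      have h1 : segments.drop (k + 1) = (segments.drop k).drop 1 := by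
        rw [List.drop_drop]
      rw [h1, hdrop]; simp
    rw [PySem.List.enumerate_cons, List.foldl_cons]
    cases rest with
    | nil =>
      have hlen : k + 1 = segments.length := by
        by_contra h
        have hlt : k + 1 < segments.length := by omega
        have hne : segments.drop (k + 1) ≠ [] := by
          intro he
          have hl := List.length_drop (l := segments) (i := k + 1)
          rw [he] at hl; simp at hl; omega
        exact hne hdrop1
      have hcond : ¬ ((k : Int) < (segments.length : Int) - 1) := by
        rw [← hlen]; omega
      simp only [pvStepA, if_neg hcond]
      simp [pvARec, PySem.List.enumerate_nil]
    | cons y rest' =>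
      have hcond : (k : Int) < (segments.length : Int) - 1 := by
        have : k + 1 < segments.length := by
          by_contra h
          rw [List.drop_eq_nil_of_le (by omega)] at hdrop1
          simp at hdrop1
        omega
      have hget : PySem.List.pyGetD segments ((k : Int) + 1) 0 = y := by
        have hcast : ((k : Int) + 1) = ((k + 1 : Nat) : Int) := by push_cast; ring
        rw [hcast, PySem.List.pyGetD_natCast]
        have : segments[k + 1]? = some y := by
          have h0 : (segments.drop (k + 1))[0]? = some y := by rw [hdrop1]; rfl
          rwa [List.getElem?_drop, Nat.add_zero] at h0
        simp [List.getD, this]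
      have hstep : pvStepA segments (acc, flag) ((k : Int), x)
          = (acc ++ [flag], if x ≠ y then flag + 1 else flag) := by
        simp only [pvStepA, if_pos hcond, hget]
      rw [hstep]
      have hk1 : ((k : Int) + 1) = ((k + 1 : Nat) : Int) := by push_cast; ring
      rw [hk1, ih (k + 1) (acc ++ [flag]) (if x ≠ y then flag + 1 else flag) hdrop1]
      simp [pvARec]

-- pvARec equals B's run-based recursion
theorem pvARec_eq_goB : ∀ (xs : List Int) (x flag : Int),
    pvARec (x :: xs) flag = pvGoB (x :: xs) flag := by
  intro xs
  induction xs with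
  | nil => intro x flag; simp [pvARec, pvGoB, pvRunLen]
  | cons y ys ih =>
    intro x flag
    by_cases hxy : x = y
    · subst hxy
      have : pvARec (x :: x :: ys) flag = flag :: pvARec (x :: ys) flag := by
        simp [pvARec]
      have ht : List.takeWhile (fun y => y == x) (x :: ys)
          = x :: List.takeWhile (fun y => y == x) ys := by simp
      have hd : List.dropWhile (fun y => y == x) (x :: ys)
          = List.dropWhile (fun y => y == x) ys := by simp
      rw [this, ih x flag]
      simp only [pvGoB, pvRunLen, ht, hd, List.length_cons]
      have h2 : 1 + ((List.takeWhile (fun y => y == x) ys).length + 1)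
          = (1 + (List.takeWhile (fun y => y == x) ys).length) + 1 := by omega
      rw [h2, List.replicate_succ]
      simp
    · have hb : (y == x) = false := by simp [Ne.symm hxy]
      have : pvARec (x :: y :: ys) flag = flag :: pvARec (y :: ys) (flag + 1) := by
        simp [pvARec, hxy]
      rw [this, ih y (flag + 1)]
      simp [pvGoB, pvRunLen, hb, List.takeWhile, List.dropWhile]

-- ===== VERDICT (by name: the statement is the Claim_ definition above) =====
theorem convert_segment_to_position_spec : Claim_equal_convert_segment_to_position := by
  unfold Claim_equal_convert_segment_to_position
  intro segments _
  unfold Spec_convert_segment_to_position convert_segment_to_position convert_segment_to_position_alt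
  have hfold := pvFoldA segments segments 0 [] 0 (by simp)
  have hstep : (fun (st : List Int × Int) (p : Int × Int) =>
      (st.1 ++ [st.2],
       if p.1 < (segments.length : Int) - 1 then
         if p.2 ≠ PySem.List.pyGetD segments (p.1 + 1) 0 then st.2 + 1 else st.2
       else st.2)) = pvStepA segments := rfl
  rw [hstep]
  have h0 : PySem.List.enumerate segments = PySem.List.enumerate segments ((0 : Nat) : Int) := by
    norm_num
  rw [h0, hfold]
  cases segments with
  | nil => simp [pvARec, pvGoB]
  | cons x xs => simpa using pvARec_eq_goB xs x 0
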